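-- pv_equiv track=rewrite | github.com/marin-community/marin | lib/marin/src/marin/profiling/ingest.py | _estimate_periodicity
-- ===== SOURCE A (Python) =====
-- from collections import Counter, defaultdict
-- from itertools import pairwise
--
-- def _estimate_periodicity(steps: list[int]) -> int | None:
--     if len(steps) < 3:
--         return None
--     sorted_steps = sorted(steps)
--     differences = [current - previous for previous, current in pairwise(sorted_steps)]
--     positive = [difference for difference in differences if difference > 1]
--     if len(positive) < 2:
--         return None
--     counts = Counter(positive)
--     best_diff, best_count = sorted(counts.items(), key=lambda item: (-item[1], item[0]))[0]
--     if best_count < 2: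
--         return None
--     return best_diff
-- ===== SOURCE B (Python) =====
-- def _estimate_periodicity(steps: list[int]) -> int | None:
--     if len(steps) < 3:
--         return None
--     ss = sorted(steps)
--     gaps = sorted(c - p for p, c in zip(ss, ss[1:]) if c - p > 1)
--     if len(gaps) < 2:
--         return None
--     cur_val = None
--     cur_run = 0
--     best_val = None
--     best_run = 0
--     for g in gaps:
--         if g == cur_val:
--             cur_run += 1
--         else:
--             cur_val, cur_run = g, 1
--         if cur_run > best_run:
--             best_val, best_run = cur_val, cur_run
--     if best_run < 2:
--         return None
--     return best_val
-- ===== Notes on version B (the rewrite author's own statement) =====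
-- stated objective: alternative
-- what changed: Replaces the Counter hash-count plus full sort of (count, value) items by sorting the positive gaps once and doing a single run-length scan that keeps the first value reaching each new maximal run (which yields the smallest-value tie-break).
import Mathlib
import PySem

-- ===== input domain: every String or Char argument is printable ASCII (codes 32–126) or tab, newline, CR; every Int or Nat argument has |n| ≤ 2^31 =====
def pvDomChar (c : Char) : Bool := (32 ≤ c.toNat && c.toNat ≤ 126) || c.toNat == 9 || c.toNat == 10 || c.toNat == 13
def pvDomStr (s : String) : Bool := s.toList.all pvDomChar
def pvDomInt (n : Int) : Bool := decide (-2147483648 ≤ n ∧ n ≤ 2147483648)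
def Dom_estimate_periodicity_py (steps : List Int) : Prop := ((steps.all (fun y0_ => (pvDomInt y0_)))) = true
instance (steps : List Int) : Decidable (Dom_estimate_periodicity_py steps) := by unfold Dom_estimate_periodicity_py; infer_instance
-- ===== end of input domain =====

-- B replaces the Counter + items-sort argmax by sorting the positive gaps and one run-length
-- scan keeping the first value reaching each new maximal run (alternative algorithm, same cost).

-- ===== PORT A =====
def estimate_periodicity_py (steps : List Int) : Option Int :=
  if steps.length < 3 then none
  else
    let sorted_steps := PySem.List.sorted steps (fun x => x) false
    -- pairwise(sorted_steps) = zip(s, s[1:]); s[1:] on a list is drop 1 (exact)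
    let differences := (sorted_steps.zip (sorted_steps.drop 1)).map (fun pc => pc.2 - pc.1)
    let positive := differences.filter (fun d => decide (d > 1))
    if positive.length < 2 then none
    else
      let counts := PySem.Dict.counter positive
      match PySem.List.pyGet? (PySem.List.sorted2 counts.items (fun it => -it.2) (fun it => it.1) false) 0 with
      | none => none   -- unreachable: counts is nonempty here (Python would raise IndexError)
      | some (best_diff, best_count) => if best_count < 2 then none else some best_diff

-- ===== PORT B =====
-- one step of Source B's loop body over state (cur_val, cur_run, best_val, best_run)
def pvScanStep (st : Option Int × Int × Option Int × Int) (g : Int) :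
    Option Int × Int × Option Int × Int :=
  let cv' := if some g = st.1 then st.1 else some g
  let cr' := if some g = st.1 then st.2.1 + 1 else 1
  if cr' > st.2.2.2 then (cv', cr', cv', cr') else (cv', cr', st.2.2.1, st.2.2.2)

def estimate_periodicity_py_alt (steps : List Int) : Option Int :=
  if steps.length < 3 then none
  else
    let ss := PySem.List.sorted steps (fun x => x) false
    let gaps := PySem.List.sorted
      (((ss.zip (ss.drop 1)).filter (fun pc => decide (pc.2 - pc.1 > 1))).map (fun pc => pc.2 - pc.1))
      (fun x => x) false
    if gaps.length < 2 then none
    else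
      let st := gaps.foldl pvScanStep (none, 0, none, 0)
      if st.2.2.2 < 2 then none else st.2.2.1

-- ===== PRECONDITION & SPEC =====
def Spec_estimate_periodicity_py (steps : List Int) (out : Option Int) : Prop := out = estimate_periodicity_py_alt steps
instance (steps : List Int) (out : Option Int) : Decidable (Spec_estimate_periodicity_py steps out) := by unfold Spec_estimate_periodicity_py; infer_instance

-- ===== CLAIM (what is proved, stated in full; the proofs are below) =====
def Claim_equal_estimate_periodicity_py : Prop := ∀ (steps : List Int), Dom_estimate_periodicity_py steps → Spec_estimate_periodicity_py steps (estimate_periodicity_py steps)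

-- ===== LEMMAS AND PROOFS =====

-- A's sort comparison on (value, count) items: key (-count, value), lexicographic
def pvLt (a b : Int × Int) : Bool :=
  decide ((-a.2 : Int) < -b.2) || (!decide ((-b.2 : Int) < -a.2) && decide (a.1 < b.1))

theorem pvLt_trans (a b c : Int × Int) (h1 : pvLt a b = true) (h2 : pvLt b c = true) :
    pvLt a c = true := by
  simp only [pvLt, Bool.or_eq_true, Bool.and_eq_true, Bool.not_eq_true',
    decide_eq_true_eq, decide_eq_false_iff_not] at *
  omega

theorem pvLt_asymm (a b : Int × Int) (h : pvLt a b = true) : pvLt b a = false := by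
  simp only [pvLt, Bool.or_eq_true, Bool.and_eq_true, Bool.not_eq_true',
    decide_eq_true_eq, decide_eq_false_iff_not, Bool.or_eq_false_iff,
    Bool.and_eq_false_iff, Bool.not_eq_false'] at *
  omega

theorem pvLt_irrefl (a : Int × Int) : pvLt a a = false := by
  simp [pvLt]

-- A's sorted2 with key (-count, value) is definitionally the insertBy fold under pvLt
theorem sorted2_eq_foldl (xs : List (Int × Int)) :
    PySem.List.sorted2 xs (fun it => -it.2) (fun it => it.1) false
      = xs.foldl (fun acc x => PySem.List.insertBy pvLt x acc) [] := rfl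

-- insertBy into a list whose pairs all satisfy "later is not before earlier" keeps that shape
theorem pairwise_insertBy {α : Type} (before : α → α → Bool)
    (htr : ∀ a b c, before a b = true → before b c = true → before a c = true)
    (hasym : ∀ a b, before a b = true → before b a = false)
    (x : α) (ys : List α) (h : ys.Pairwise (fun a b => before b a = false)) :
    (PySem.List.insertBy before x ys).Pairwise (fun a b => before b a = false) := by
  induction ys with
  | nil => simp [PySem.List.insertBy]
  | cons y ys ih =>
    rw [List.pairwise_cons] at h
    obtain ⟨hy, hys⟩ := h
    by_cases hb : before x y = true
    · simp only [PySem.List.insertBy, hb, if_true]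
      refine List.Pairwise.cons ?_ (List.Pairwise.cons hy hys)
      intro z hz
      rcases List.mem_cons.mp hz with rfl | hz
      · exact hasym _ _ hb
      · by_cases hzx : before z x = true
        · have := htr _ _ _ hzx hb
          rw [hy z hz] at this; exact absurd this (by simp)
        · simpa using hzx
    · simp only [PySem.List.insertBy, hb]
      refine List.Pairwise.cons ?_ (ih hys)
      intro z hz
      rcases (PySem.List.mem_insertBy before x z ys).mp hz with rfl | hz
      · simpa using hb
      · exact hy z hz

theorem pairwise_foldl_insertBy {α : Type} (before : α → α → Bool)
    (htr : ∀ a b c, before a b = true → before b c = true → before a c = true)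
    (hasym : ∀ a b, before a b = true → before b a = false)
    (xs : List α) : ∀ (acc : List α), acc.Pairwise (fun a b => before b a = false) →
    (xs.foldl (fun acc x => PySem.List.insertBy before x acc) acc).Pairwise
      (fun a b => before b a = false) := by
  induction xs with
  | nil => intro acc h; simpa using h
  | cons x xs ih =>
    intro acc h
    exact ih _ (pairwise_insertBy before htr hasym x acc h)

-- head of A's sorted2 is minimal under pvLt among all items
theorem sorted2_head_min (xs : List (Int × Int)) (m : Int × Int) (t : List (Int × Int))
    (h : PySem.List.sorted2 xs (fun it => -it.2) (fun it => it.1) false = m :: t) :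
    ∀ y ∈ xs, pvLt y m = false := by
  intro y hy
  have hperm : (PySem.List.sorted2 xs (fun it => -it.2) (fun it => it.1) false).Perm xs :=
    PySem.List.sorted2_perm xs _ _ false
  have hy' : y ∈ m :: t := by rw [← h]; exact hperm.mem_iff.mpr hy
  have hpw : (PySem.List.sorted2 xs (fun it => -it.2) (fun it => it.1) false).Pairwise
      (fun a b => pvLt b a = false) := by
    rw [sorted2_eq_foldl]
    exact pairwise_foldl_insertBy pvLt pvLt_trans pvLt_asymm xs [] List.Pairwise.nil
  rw [h, List.pairwise_cons] at hpw
  rcases List.mem_cons.mp hy' with rfl | hy'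
  · exact pvLt_irrefl y
  · exact hpw.1 y hy'

-- invariant of Source B's run-length scan after processing prefix u of the sorted gap list
def pvInv (u : List Int) (st : Option Int × Int × Option Int × Int) : Prop :=
  (u = [] ∧ st = (none, 0, none, 0)) ∨
  (∃ v w, st = (some v, (u.count v : Int), some w, (u.count w : Int)) ∧ v ∈ u ∧ w ∈ u ∧
    (∀ y ∈ u, y ≤ v) ∧ (∀ y ∈ u, u.count y < u.count w ∨ (u.count y = u.count w ∧ w ≤ y)))

theorem pvInv_step (u : List Int) (st : Option Int × Int × Option Int × Int) (g : Int)
    (h : pvInv u st) (hle : ∀ y ∈ u, y ≤ g) : pvInv (u ++ [g]) (pvScanStep st g) := by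
  have hcnt : ∀ y, (u ++ [g]).count y = u.count y + (if g = y then 1 else 0) := by
    intro y; simp [List.count_append, List.count_singleton]
  have hmem : ∀ y, y ∈ u ++ [g] → y ∈ u ∨ y = g := by
    intro y hy
    rcases List.mem_append.mp hy with hy | hy
    · exact Or.inl hy
    · simp at hy; exact Or.inr hy
  rcases h with ⟨rfl, rfl⟩ | ⟨v, w, rfl, hv, hw, hmax, hbest⟩
  · right
    refine ⟨g, g, ?_, by simp, by simp, by simp, ?_⟩
    · simp [pvScanStep]
    · intro y hy; simp at hy; subst hy; simp
  · have hvg : v ≤ g := hle v hv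
    have hwv : w ≤ v := hmax w hw
    have hcw : 1 ≤ u.count w := List.count_pos_iff.mpr hw
    have hcg : (u ++ [g]).count g = u.count g + 1 := by rw [hcnt g]; simp
    by_cases hgv : g = v
    · subst hgv
      have hstep : pvScanStep (some g, (u.count g : Int), some w, (u.count w : Int)) g
          = (if ((u.count g : Int) + 1 > (u.count w : Int))
              then (some g, (u.count g : Int) + 1, some g, (u.count g : Int) + 1)
              else (some g, (u.count g : Int) + 1, some w, (u.count w : Int))) := by
        simp [pvScanStep]
      rw [hstep]
      split_ifs with hgt
      · right
        refine ⟨g, g, ?_, by simp, by simp, ?_, ?_⟩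
        · rw [hcg]; push_cast; ring_nf
        · intro y hy
          rcases hmem y hy with hy | hy
          · exact hmax y hy
          · omega
        · intro y hy
          rw [hcnt y, hcg]
          rcases eq_or_ne g y with rfl | i1
          · rw [if_pos rfl]; omega
          · rw [if_neg i1]
            have hyu : y ∈ u := by
              rcases hmem y hy with hh | hh
              · exact hh
              · exact absurd hh.symm i1
            have := hbest y hyu
            omega
      · right
        have hwg : w ≠ g := by intro hwg; subst hwg; omega
        have hcw' : (u ++ [g]).count w = u.count w := by
          rw [hcnt w, if_neg (fun hh => hwg hh.symm)]; omega
        refine ⟨g, w, ?_, by simp, List.mem_append_left _ hw, ?_, ?_⟩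
        · rw [hcg, hcw']; push_cast; ring_nf
        · intro y hy
          rcases hmem y hy with hy | hy
          · exact hmax y hy
          · omega
        · intro y hy
          rw [hcnt y, hcw']
          rcases eq_or_ne g y with rfl | i1
          · rw [if_pos rfl]; omega
          · rw [if_neg i1]
            have hyu : y ∈ u := by
              rcases hmem y hy with hh | hh
              · exact hh
              · exact absurd hh.symm i1
            have := hbest y hyu
            omega
    · -- a strictly larger gap g starts a fresh run of length 1
      have hgu : g ∉ u := fun hgu => hgv (le_antisymm (hmax g hgu) hvg)
      have hwg : w ≠ g := fun hh => hgu (hh ▸ hw)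
      have hcu : u.count g = 0 := List.count_eq_zero.mpr hgu
      have hstep : pvScanStep (some v, (u.count v : Int), some w, (u.count w : Int)) g
          = (some g, 1, some w, (u.count w : Int)) := by
        have hne : (some g : Option Int) ≠ some v := by simpa using hgv
        simp only [pvScanStep, if_neg hne]
        rw [if_neg (by omega)]
      rw [hstep]
      have hcw' : (u ++ [g]).count w = u.count w := by
        rw [hcnt w, if_neg (fun hh => hwg hh.symm)]; omega
      right
      refine ⟨g, w, ?_, by simp, List.mem_append_left _ hw, ?_, ?_⟩
      · rw [hcg, hcw', hcu]; norm_num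
      · intro y hy
        rcases hmem y hy with hy | hy
        · exact hle y hy
        · omega
      · intro y hy
        rw [hcnt y, hcw']
        rcases eq_or_ne g y with rfl | i1
        · rw [if_pos rfl, hcu]; omega
        · rw [if_neg i1]
          have hyu : y ∈ u := by
            rcases hmem y hy with hh | hh
            · exact hh
            · exact absurd hh.symm i1
          have := hbest y hyu
          omega

theorem pvInv_foldl : ∀ (rest u : List Int) (st : Option Int × Int × Option Int × Int),
    pvInv u st → (∀ y ∈ u, ∀ z ∈ rest, y ≤ z) → rest.Pairwise (· ≤ ·) →
    pvInv (u ++ rest) (rest.foldl pvScanStep st) := by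
  intro rest
  induction rest with
  | nil => intro u st h _ _; simpa using h
  | cons g rest ih =>
    intro u st h hcross hpw
    rw [List.pairwise_cons] at hpw
    have h1 : pvInv (u ++ [g]) (pvScanStep st g) :=
      pvInv_step u st g h (fun y hy => hcross y hy g (List.mem_cons_self ..))
    have h2 := ih (u ++ [g]) (pvScanStep st g) h1
      (fun y hy z hz => by
        rcases List.mem_append.mp hy with hy | hy
        · exact hcross y hy z (List.mem_cons_of_mem _ hz)
        · simp at hy; subst hy; exact hpw.1 z hz)
      hpw.2
    simpa [List.append_assoc] using h2

-- the two ports agree on every input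
theorem pv_main (steps : List Int) :
    estimate_periodicity_py steps = estimate_periodicity_py_alt steps := by
  unfold estimate_periodicity_py estimate_periodicity_py_alt
  by_cases h3 : steps.length < 3
  · simp [h3]
  · simp only [h3, if_false]
    set ss := PySem.List.sorted steps (fun x => x) false with hss
    set p := ((ss.zip (ss.drop 1)).map (fun pc => pc.2 - pc.1)).filter (fun d => decide (d > 1)) with hp
    have hfm : ((ss.zip (ss.drop 1)).filter (fun pc => decide (pc.2 - pc.1 > 1))).map
        (fun pc => pc.2 - pc.1) = p := by
      rw [hp, List.filter_map]; rfl
    rw [hfm]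
    set q := PySem.List.sorted p (fun x => x) false with hq
    have hqperm : q.Perm p := PySem.List.sorted_perm p _ false
    have hqlen : q.length = p.length := hqperm.length_eq
    by_cases h2 : p.length < 2
    · simp [h2, hqlen]
    · rw [if_neg h2, if_neg (by omega)]
      -- B side: run the scan invariant over the sorted gaps q
      have hqpw : q.Pairwise (· ≤ ·) := by
        have := PySem.List.sorted_pairwise p (fun x => x)
        simpa using this
      have hinv : pvInv q (q.foldl pvScanStep (none, 0, none, 0)) := by
        have := pvInv_foldl q [] (none, 0, none, 0) (Or.inl ⟨rfl, rfl⟩) (by simp) hqpw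
        simpa using this
      have hqne : q ≠ [] := by
        intro h; rw [h] at hqlen; simp at hqlen; omega
      rcases hinv with ⟨hnil, _⟩ | ⟨v, w, hst, hv, hw, hmax, hbest⟩
      · exact absurd hnil hqne
      -- A side: items of Counter(positive) and the head of their sort
      have hitems : (PySem.Dict.counter p).items =
          (PySem.Set.ofList p).map (fun k => (k, (p.count k : Int))) :=
        PySem.Dict.items_counter p
      have hpne : p ≠ [] := by intro h; rw [h] at h2; simp at h2
      have hSne : (PySem.Set.ofList p) ≠ [] := by
        intro h
        rcases List.exists_mem_of_ne_nil p hpne with ⟨x, hx⟩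
        have : x ∈ PySem.Set.ofList p := (PySem.Set.mem_ofList p x).mpr hx
        rw [h] at this; simp at this
      have hine : (PySem.Dict.counter p).items ≠ [] := by
        rw [hitems]; simpa using hSne
      set L := PySem.List.sorted2 (PySem.Dict.counter p).items (fun it => -it.2)
        (fun it => it.1) false with hL
      have hLperm : L.Perm (PySem.Dict.counter p).items := PySem.List.sorted2_perm _ _ _ false
      have hLne : L ≠ [] := by
        intro h; rw [h] at hLperm; exact hine hLperm.nil_eq.symm
      obtain ⟨m, t, hmt⟩ := List.exists_cons_of_ne_nil hLne
      rw [hmt]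
      have hget : PySem.List.pyGet? (m :: t) 0 = some m := by
        simp [PySem.List.pyGet?, PySem.List.pyIdx?]
      rw [hget]
      -- m is an item: m = (k, count k) for some k ∈ p
      have hmem : m ∈ (PySem.Dict.counter p).items := by
        have : m ∈ L := by rw [hmt]; exact List.mem_cons_self ..
        exact hLperm.mem_iff.mp this
      rw [hitems] at hmem
      obtain ⟨k, hkS, hkm⟩ := List.mem_map.mp hmem
      have hkp : k ∈ p := (PySem.Set.mem_ofList p k).mp hkS
      -- minimality of m over all items, in arithmetic form
      have hmin : ∀ y ∈ p, p.count y < p.count k ∨ (p.count y = p.count k ∧ k ≤ y) := by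
        intro y hy
        have hym : (y, (p.count y : Int)) ∈ (PySem.Dict.counter p).items := by
          rw [hitems]; exact List.mem_map.mpr ⟨y, (PySem.Set.mem_ofList p y).mpr hy, rfl⟩
        have := sorted2_head_min _ m t (hL ▸ hmt) _ hym
        rw [← hkm] at this
        simp only [pvLt, Bool.or_eq_false_iff, Bool.and_eq_false_iff, Bool.not_eq_false',
          decide_eq_false_iff_not, decide_eq_true_eq, not_lt, neg_le_neg_iff] at this
        rcases this with ⟨h1, h2 | h2⟩
        · left; exact_mod_cast lt_of_neg_lt_neg h2
        · by_cases hcc : p.count y = p.count k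
          · right; exact ⟨hcc, h2⟩
          · left
            have : (p.count k : Int) ≤ (p.count y : Int) → False := by
              intro hh
              have : (p.count y : Int) = p.count k := le_antisymm (by exact_mod_cast h1) hh
              exact hcc (by exact_mod_cast this)
            omega
      -- B's best value w has the same characterisation over p
      have hwp : w ∈ p := hqperm.mem_iff.mp hw
      have hbest' : ∀ y ∈ p, p.count y < p.count w ∨ (p.count y = p.count w ∧ w ≤ y) := by
        intro y hy
        have := hbest y (hqperm.mem_iff.mpr hy)
        rwa [hqperm.count_eq, hqperm.count_eq] at this
      -- uniqueness: k = w
      have hkw : k = w := by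
        rcases hmin w hwp with h1 | ⟨h1, h2⟩ <;> rcases hbest' k hkp with h1' | ⟨h1', h2'⟩ <;>
          omega
      subst hkw
      rw [hst, ← hkm]
      simp only
      rw [hqperm.count_eq]
  
-- ===== VERDICT (by name: the statement is the Claim_ definition above) =====
theorem estimate_periodicity_py_spec : Claim_equal_estimate_periodicity_py := by
  intro steps _
  unfold Spec_estimate_periodicity_py
  exact pv_main steps
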